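-- pv_equiv track=rewrite | github.com/ishivammishra/Leetcode_codes | 3950-maximum-k-to-sort-a-permutation/3950-maximum-k-to-sort-a-permutation.py | sortPermutation
-- ===== SOURCE A (Python) =====
-- from typing import List
--
-- def sortPermutation(nums: List[int]) -> int:
--     n = len(nums)
--     ans = -1
--     for i in range(n):
--         if nums[i] != i:
--             ans = i
--             break
--     if ans == -1:
--         return 0
--     for i in range(n):
--         if nums[i] != i:
--             ans = ans & i
--
--     return ans
-- ===== SOURCE B (Python) =====
-- from typing import List
--
-- def sortPermutation(nums: List[int]) -> int:
--     # Bitwise reconstruction: the answer is the AND of all misplaced indices.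
--     # Instead of folding AND, rebuild it bit by bit: bit b is in the answer iff
--     # every misplaced index has bit b set; bits above the first misplaced index
--     # are never common (that index lacks them), so scanning b = 1,2,4,... up to
--     # m[0] is enough.
--     m = [i for i, v in enumerate(nums) if v != i]
--     if not m:
--         return 0
--     ans, b = 0, 1
--     while b <= m[0]:
--         if all(i & b for i in m):
--             ans |= b
--         b <<= 1
--     return ans
-- ===== Notes on version B (the rewrite author's own statement) =====
-- stated objective: alternative
-- what changed: Instead of A's break-based search for the first misplaced index followed by an AND-fold over misplaced indices, B collects the misplaced indices once and rebuilds the answer bit by bit: a power of two b (scanned up to the first misplaced index) is OR-ed into the result iff every misplaced index has that bit set.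
import Mathlib
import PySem

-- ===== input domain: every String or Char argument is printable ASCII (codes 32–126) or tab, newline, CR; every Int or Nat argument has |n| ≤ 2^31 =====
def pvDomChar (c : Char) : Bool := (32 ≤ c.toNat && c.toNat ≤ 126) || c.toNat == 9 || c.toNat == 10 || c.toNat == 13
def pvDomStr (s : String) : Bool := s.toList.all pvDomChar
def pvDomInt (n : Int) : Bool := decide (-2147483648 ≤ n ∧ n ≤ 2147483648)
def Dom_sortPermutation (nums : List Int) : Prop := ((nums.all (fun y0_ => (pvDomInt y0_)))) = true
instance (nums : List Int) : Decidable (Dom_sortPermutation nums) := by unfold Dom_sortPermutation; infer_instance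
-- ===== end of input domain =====

-- B rebuilds the AND of the misplaced indices bit by bit (OR of the powers of two set in
-- every misplaced index, scanned up to the first misplaced index) instead of A's two-pass
-- search-then-AND-fold; objective: alternative algorithm.


-- ===== PORT A =====
-- A's first loop: scan the indices in order, return the first misplaced one, -1 if none (the break).
def sortPermFind (nums : List Int) : List Nat → Int
  | [] => -1
  | i :: rest => if nums.getD i 0 ≠ (i : Int) then (i : Int) else sortPermFind nums rest

def sortPermutation (nums : List Int) : Int :=
  let n := nums.length
  let ans := sortPermFind nums (List.range n)
  if ans = -1 then 0
  else (List.range n).foldl (fun a i => if nums.getD i 0 ≠ (i : Int) then Int.land a i else a) ans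

-- ===== PORT B =====
-- B's while loop: b runs over powers of two while b ≤ m0 (= m[0]); bit b is OR-ed into ans
-- iff every index in m has it set.  The '1 ≤ b' conjunct only makes the recursion total
-- (b is a power of two ≥ 1 at every call, so it is always true there).
def altBits (m : List Nat) (m0 : Nat) (b : Nat) (ans : Int) : Int :=
  if 1 ≤ b ∧ b ≤ m0 then
    altBits m m0 (b <<< 1) (if m.all (fun i => i &&& b ≠ 0) then Int.lor ans (b : Int) else ans)
  else ans
termination_by m0 + 1 - b
decreasing_by simp [Nat.shiftLeft_eq] at *; omega

def sortPermutation_alt (nums : List Int) : Int :=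
  let m := (nums.zipIdx.filter (fun p => p.1 ≠ (p.2 : Int))).map (·.2)
  match m with
  | [] => 0
  | m0 :: _ => altBits m m0 1 0

-- ===== PRECONDITION & SPEC =====
def Spec_sortPermutation (nums : List Int) (out : Int) : Prop := out = sortPermutation_alt nums
instance (nums : List Int) (out : Int) : Decidable (Spec_sortPermutation nums out) := by unfold Spec_sortPermutation; infer_instance

-- ===== CLAIM (what is proved, stated in full; the proofs are below) =====
def Claim_equal_sortPermutation : Prop := ∀ (nums : List Int), Dom_sortPermutation nums → Spec_sortPermutation nums (sortPermutation nums)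

-- ===== LEMMAS AND PROOFS =====
-- the misplaced-index predicate
def pvQ (nums : List Int) (i : Nat) : Bool := nums.getD i 0 ≠ (i : Int)

theorem pv_find_eq (nums : List Int) (l : List Nat) :
    sortPermFind nums l =
      match l.filter (pvQ nums) with
      | [] => -1
      | i :: _ => (i : Int) := by
  induction l with
  | nil => simp [sortPermFind]
  | cons i rest ih =>
    rw [sortPermFind, List.filter_cons]
    by_cases h : nums[i]?.getD 0 = (i : Int) <;>
      simp [pvQ, List.getD, h, ih]

theorem pv_foldA_eq (nums : List Int) (l : List Nat) (a : Int) :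
    l.foldl (fun a i => if nums.getD i 0 ≠ (i : Int) then Int.land a i else a) a =
      (l.filter (pvQ nums)).foldl (fun (a : Int) (i : Nat) => Int.land a (i : Int)) a := by
  induction l generalizing a with
  | nil => rfl
  | cons i rest ih =>
    rw [List.foldl_cons, List.filter_cons, ih]
    by_cases h : nums[i]?.getD 0 = (i : Int) <;>
      simp [pvQ, List.getD, h]

theorem pv_zipIdx_eq (nums : List Int) :
    nums.zipIdx = (List.range nums.length).map (fun i => (nums.getD i 0, i)) := by
  apply List.ext_getElem
  · simp
  · intro i h1 h2
    simp at h1 ⊢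
    simp [List.getElem?_eq_getElem h1]

-- Int fold of land over casts is the Nat fold of &&&
theorem pv_fold_land_nat (l : List Nat) (a : Nat) :
    l.foldl (fun (x : Int) (i : Nat) => Int.land x (i : Int)) (a : Int) =
      ((l.foldl (fun x i => x &&& i) a : Nat) : Int) := by
  induction l generalizing a with
  | nil => rfl
  | cons i rest ih => simpa using ih (a &&& i)

-- bit k of an AND-fold
theorem pv_testBit_fold (l : List Nat) (a : Nat) (k : Nat) :
    (l.foldl (fun x i => x &&& i) a).testBit k =
      (a.testBit k && l.all (fun i => i.testBit k)) := by
  induction l generalizing a with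
  | nil => simp
  | cons i rest ih =>
    simp [List.foldl_cons, ih, Nat.testBit_and, Bool.and_assoc]

theorem pv_fold_and_le (l : List Nat) (a : Nat) :
    l.foldl (fun x i => x &&& i) a ≤ a := by
  induction l generalizing a with
  | nil => exact le_rfl
  | cons i rest ih => exact le_trans (ih (a &&& i)) (Nat.and_le_left)

-- the main invariant of B's loop: starting at b = 2^k with accumulator ↑a, the loop
-- produces the bits ≥ k of the AND-fold OR-ed onto a.
theorem pv_altBits_eq (m0 : Nat) (rest : List Nat) (k : Nat) (a : Nat) :
    altBits (m0 :: rest) m0 (2 ^ k) ((a : Int)) =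
      (((a ||| ((m0 :: rest).foldl (fun x i => x &&& i) m0) >>> k <<< k : Nat)) : Int) := by
  have hF : (m0 :: rest).foldl (fun x i => x &&& i) m0 ≤ m0 := pv_fold_and_le (m0 :: rest) m0
  have hcons : (m0 :: rest).foldl (fun x i => x &&& i) m0 = rest.foldl (fun x i => x &&& i) m0 := by
    simp
  rw [hcons] at hF
  rw [altBits, hcons]
  by_cases hb : 2 ^ k ≤ m0
  · rw [if_pos ⟨Nat.one_le_two_pow, hb⟩]
    have hall : ((m0 :: rest).all (fun i => i &&& 2 ^ k ≠ 0)) =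
        (rest.foldl (fun x i => x &&& i) m0).testBit k := by
      rw [← hcons, pv_testBit_fold]
      cases h0 : m0.testBit k <;> simp [Nat.and_two_pow, h0]
    rw [hall]
    have hstep : (if (rest.foldl (fun x i => x &&& i) m0).testBit k
        then Int.lor (a : Int) (((2 ^ k : Nat) : Int)) else ((a : Int)))
        = (((if (rest.foldl (fun x i => x &&& i) m0).testBit k then a ||| 2 ^ k else a : Nat)) : Int) := by
      split_ifs <;> rfl
    have hshift : (2 ^ k) <<< 1 = 2 ^ (k + 1) := by simp [Nat.shiftLeft_eq, pow_succ]
    rw [hstep, hshift, pv_altBits_eq m0 rest (k + 1) _, hcons]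
    congr 1
    apply Nat.eq_of_testBit_eq
    intro j
    rcases Nat.lt_trichotomy j k with hj | hj | hj
    · have h1 : ¬ k ≤ j := by omega
      have h2 : ¬ k + 1 ≤ j := by omega
      have h3 : k ≠ j := by omega
      by_cases h : (rest.foldl (fun x i => x &&& i) m0).testBit k <;>
        simp [Nat.testBit_or, Nat.testBit_shiftLeft, Nat.testBit_shiftRight, Nat.testBit_two_pow, h, h1, h2, h3]
    · subst hj
      have h2 : ¬ j + 1 ≤ j := by omega
      by_cases h : (rest.foldl (fun x i => x &&& i) m0).testBit j <;>
        simp [Nat.testBit_or, Nat.testBit_shiftLeft, Nat.testBit_shiftRight, Nat.testBit_two_pow, h, h2]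
    · have h1 : k ≤ j := by omega
      have h2 : k + 1 ≤ j := by omega
      have h3 : k ≠ j := by omega
      have e1 : k + (j - k) = j := by omega
      have e2 : k + 1 + (j - (k + 1)) = j := by omega
      by_cases h : (rest.foldl (fun x i => x &&& i) m0).testBit k <;>
        simp [Nat.testBit_or, Nat.testBit_shiftLeft, Nat.testBit_shiftRight, Nat.testBit_two_pow, h, h1, h2, h3, e1, e2]
  · rw [if_neg (fun h => hb h.2)]
    have hlt : rest.foldl (fun x i => x &&& i) m0 < 2 ^ k := by omega
    have h0 : (rest.foldl (fun x i => x &&& i) m0) >>> k = 0 := by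
      rw [Nat.shiftRight_eq_div_pow]
      exact Nat.div_eq_of_lt hlt
    simp [h0]
termination_by m0 + 1 - 2 ^ k
decreasing_by
  have h1 : 1 ≤ 2 ^ k := Nat.one_le_two_pow
  have h2 : 2 ^ (k + 1) = 2 ^ k * 2 := pow_succ 2 k
  omega

-- ===== VERDICT (by name: the statement is the Claim_ definition above) =====
theorem sortPermutation_spec : Claim_equal_sortPermutation := by
  intro nums _
  unfold Spec_sortPermutation sortPermutation sortPermutation_alt
  rw [pv_zipIdx_eq, List.filter_map, List.map_map]
  have hc : ((fun (p : Int × Nat) => decide (p.1 ≠ (p.2 : Int))) ∘ (fun (i : Nat) => (nums.getD i 0, i))) = pvQ nums := by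
    funext i; simp [pvQ, Function.comp]
  have hm : (((List.range nums.length).filter (pvQ nums)).map ((·.2) ∘ (fun (i : Nat) => (nums.getD i 0, i)))) = (List.range nums.length).filter (pvQ nums) := by
    rw [show ((·.2) ∘ (fun (i : Nat) => (nums.getD i 0, i))) = id from funext (fun i => rfl)]
    exact List.map_id _
  rw [hc, hm]
  simp only [pv_find_eq, pv_foldA_eq]
  cases hmm : (List.range nums.length).filter (pvQ nums) with
  | nil => simp
  | cons m0 rest =>
    have hne : ((m0 : Int)) ≠ -1 := by omega
    rw [if_neg hne, pv_fold_land_nat]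
    have h := pv_altBits_eq m0 rest 0 0
    simp only [pow_zero, Nat.shiftRight_zero, Nat.shiftLeft_zero, Nat.zero_or, Nat.cast_zero] at h
    exact h.symm
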